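-- pv_equiv track=rewrite | github.com/vhborges/cryptography | One-time pad/manytimepad_attack.py | computeKey
-- ===== SOURCE A (Python) =====
-- def findSpaces(cipher1, cipher2, frequencies):
--     cipher1 = bytes.fromhex(cipher1)
--     cipher2 = bytes.fromhex(cipher2)
--     c1Xc2 = xorb(cipher1, cipher2).hex()
--     for i in range(0, len(c1Xc2), 2):
--         xorResult = int(c1Xc2[i:i+2], 16)
--         if hasSpace(xorResult):
--             frequencies[int(i/2)] += 1
--
-- def hasSpace(xorResult):
--     if 65 <= xorResult <= 90 or\
--             97 <= xorResult <= 122 or\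
--             xorResult == 0:
--         return True
--     else:
--         return False
--
-- def xorb(msg1, msg2):
--     return bytes(a^b for a, b in zip(msg1, msg2))
--
-- def computeKey(ciphertexts):
--     keySize = max(int(len(cipher)/2) for cipher in ciphertexts)
--     key = [None]*keySize
--     maxFrequency = [0]*keySize
--     for cipher1 in ciphertexts:
--         frequencies = [0]*int(len(cipher1)/2)
--         for cipher2 in ciphertexts:
--             if cipher1 != cipher2:
--                 findSpaces(cipher1, cipher2, frequencies)
--         cipher1 = bytes.fromhex(cipher1)
--         for pos, freq in zip(range(len(frequencies)), frequencies):
--             limit = numberOfMsgs(ciphertexts, pos) - 1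
--             margin = int(limit/4)
--             if freq >= limit-margin and freq > maxFrequency[pos]:
--                 maxFrequency[pos] = freq
--                 key[pos] = cipher1[pos]^ord(' ')
--     return key
--
-- def numberOfMsgs(ciphertexts, pos):
--     pos = 2*pos
--     return sum(1 for msg in ciphertexts if len(msg) > pos)
-- ===== SOURCE B (Python) =====
-- def computeKey(ciphertexts):
--     # Histogram-based rewrite: decode every hex ciphertext once, index the exact
--     # ciphertext strings by multiplicity once, and per key position build a
--     # 256-entry byte histogram so the inner scan over all other ciphertexts is
--     # replaced by a sum over byte values (minus the equal-string multiplicity).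
--     byts = [bytes.fromhex(s) for s in ciphertexts]
--     mult = {}
--     for s in ciphertexts:
--         mult[s] = mult.get(s, 0) + 1
--     keySize = max(len(s) // 2 for s in ciphertexts)
--     key = [None] * keySize
--     for pos in range(keySize):
--         limit = sum(1 for s in ciphertexts if len(s) > 2 * pos) - 1
--         threshold = limit - limit // 4
--         cnt = [0] * 256
--         for b in byts:
--             if pos < len(b):
--                 cnt[b[pos]] += 1
--         best = 0
--         for s, b in zip(ciphertexts, byts):
--             if pos < len(b):
--                 x = b[pos]
--                 freq = sum(cnt[v] for v in range(256) if spaceLike(x ^ v)) - mult[s]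
--                 if freq >= threshold and freq > best:
--                     best = freq
--                     key[pos] = x ^ 32
--     return key
--
-- def spaceLike(r):
--     return 65 <= r <= 90 or 97 <= r <= 122 or r == 0
-- ===== Notes on version B (the rewrite author's own statement) =====
-- stated objective: alternative
-- what changed: A scans, for each ciphertext, every other ciphertext again per position via hex re-encoding (findSpaces) and mutates key/maxFrequency arrays; B decodes all ciphertexts once, builds a string-multiplicity dict once and a 256-entry byte histogram per position, so each candidate's frequency is a sum over byte values minus its equal-string multiplicity instead of an inner scan over the ciphertext list.
import Mathlib
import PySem

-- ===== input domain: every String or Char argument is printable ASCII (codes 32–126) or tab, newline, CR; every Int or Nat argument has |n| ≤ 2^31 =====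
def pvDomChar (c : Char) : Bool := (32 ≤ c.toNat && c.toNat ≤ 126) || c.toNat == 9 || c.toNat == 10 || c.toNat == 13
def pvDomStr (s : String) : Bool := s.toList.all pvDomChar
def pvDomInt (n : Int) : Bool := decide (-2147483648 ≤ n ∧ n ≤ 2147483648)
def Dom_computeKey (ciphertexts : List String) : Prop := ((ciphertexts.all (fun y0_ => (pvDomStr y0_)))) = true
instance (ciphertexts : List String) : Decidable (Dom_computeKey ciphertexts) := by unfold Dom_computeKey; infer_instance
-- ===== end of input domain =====

-- B replaces A's per-ciphertext rescans with structures built once per input/column: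
-- a string-multiplicity dict and a 256-entry byte histogram per key position, the
-- candidate frequency becoming a histogram sum minus the equal-string multiplicity
-- (objective: alternative — same asymptotics on small alphabets, different algorithm).


-- ===== PORT A =====
def isWsB (c : Char) : Bool := c.toNat == 32 || c.toNat == 9 || c.toNat == 10 || c.toNat == 13

-- bytes.fromhex: ASCII whitespace is skipped between digit pairs (exact on the Pre_ domain)
def hexVal (c : Char) : Nat :=
  if 48 ≤ c.toNat ∧ c.toNat ≤ 57 then c.toNat - 48
  else if 97 ≤ c.toNat ∧ c.toNat ≤ 102 then c.toNat - 87
  else if 65 ≤ c.toNat ∧ c.toNat ≤ 70 then c.toNat - 55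
  else 0

def toBytes : List Char → List Nat
  | [] => []
  | c :: rest =>
    if isWsB c then toBytes rest
    else
      match rest with
      | d :: rest2 => (hexVal c * 16 + hexVal d) :: toBytes rest2
      | [] => []

def hasSpaceB (x : Nat) : Bool := (65 ≤ x && x ≤ 90) || (97 ≤ x && x ≤ 122) || (x == 0)

def xorb (m1 m2 : List Nat) : List Nat := List.zipWith (fun a b => a ^^^ b) m1 m2

-- the loop of findSpaces; the hex re-encode of xorb followed by int(_,16) is ported
-- as the byte value itself (exact round trip), i ranges over byte positions
def findSpacesGo (xs : List Nat) (i : Nat) (freqs : List Int) : List Int :=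
  match xs with
  | [] => freqs
  | x :: rest =>
    findSpacesGo rest (i + 1) (if hasSpaceB x then freqs.set i (freqs.getD i 0 + 1) else freqs)

def findSpaces (c1 c2 : String) (freqs : List Int) : List Int :=
  findSpacesGo (xorb (toBytes c1.toList) (toBytes c2.toList)) 0 freqs

def numberOfMsgs (cts : List String) (pos : Nat) : Int :=
  ((cts.countP (fun m => decide (2 * pos < m.toList.length)) : Nat) : Int)

-- the 'for pos, freq in zip(range(len(frequencies)), frequencies)' loop;
-- int(limit/4) is ported as floor division, exact since limit ≥ 0 whenever pos < len(frequencies)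
def keyLoopGo (cts : List String) (b1 : List Nat) (freqs : List Int) (pos : Nat)
    (key : List (Option Int)) (maxF : List Int) : List (Option Int) × List Int :=
  match freqs with
  | [] => (key, maxF)
  | f :: rest =>
    let limit := numberOfMsgs cts pos - 1
    let margin := PySem.Int.floordiv limit 4
    if f ≥ limit - margin ∧ f > maxF.getD pos 0 then
      keyLoopGo cts b1 rest (pos + 1)
        (key.set pos (some (Int.ofNat ((b1.getD pos 0) ^^^ 32)))) (maxF.set pos f)
    else
      keyLoopGo cts b1 rest (pos + 1) key maxF

def computeKey (ciphertexts : List String) : List (Option Int) :=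
  -- max(int(len(c)/2) …): Python raises on the empty list, which Pre_ excludes
  let keySize := ciphertexts.foldl (fun m s => max m (s.toList.length / 2)) 0
  let fin := ciphertexts.foldl (fun (st : List (Option Int) × List Int) c1 =>
      let freqs := ciphertexts.foldl
        (fun fr c2 => if c1 ≠ c2 then findSpaces c1 c2 fr else fr)
        (List.replicate (c1.toList.length / 2) (0 : Int))
      keyLoopGo ciphertexts (toBytes c1.toList) freqs 0 st.1 st.2)
    (List.replicate keySize (none : Option Int), List.replicate keySize (0 : Int))
  fin.1

-- ===== PORT B =====
def computeKey_alt (ciphertexts : List String) : List (Option Int) :=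
  let byts := ciphertexts.map (fun s => toBytes s.toList)
  -- mult[s] = mult.get(s, 0) + 1
  let mult := ciphertexts.foldl
    (fun (d : PySem.Dict String Int) s => d.insert s (d.getD s 0 + 1)) PySem.Dict.empty
  -- max(len(s) // 2 …): Python raises on the empty list, which Pre_ excludes
  let keySize := ciphertexts.foldl (fun m s => max m (s.toList.length / 2)) 0
  (List.range keySize).map (fun pos =>
    let limit : Int :=
      ((ciphertexts.countP (fun s => decide (2 * pos < s.toList.length)) : Nat) : Int) - 1
    let threshold := limit - PySem.Int.floordiv limit 4
    -- cnt = [0]*256; for b in byts: if pos < len(b): cnt[b[pos]] += 1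
    let cnt := byts.foldl
      (fun c b => if pos < b.length then c.set (b.getD pos 0) (c.getD (b.getD pos 0) 0 + 1) else c)
      (List.replicate 256 (0 : Int))
    ((ciphertexts.zip byts).foldl (fun (st : Option Int × Int) p =>
        if pos < p.2.length then
          let x := p.2.getD pos 0
          let freq := ((List.range 256).foldl
              (fun a v => if hasSpaceB (x ^^^ v) then a + cnt.getD v 0 else a) 0)
            - mult.getD p.1 0
          if freq ≥ threshold ∧ freq > st.2 then (some (Int.ofNat (x ^^^ 32)), freq) else st
        else st)
      ((none : Option Int), (0 : Int))).1)

-- ===== PRECONDITION & SPEC =====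
def hexCharB (c : Char) : Bool :=
  (48 ≤ c.toNat && c.toNat ≤ 57) || (97 ≤ c.toNat && c.toNat ≤ 102) || (65 ≤ c.toNat && c.toNat ≤ 70)

-- Pre_ excludes exactly the inputs on which the Python raises: an empty list (max() raises)
-- or a string bytes.fromhex rejects (ValueError): every character must be a hex digit or ASCII
-- whitespace, the number of hex digits must be even, and whitespace may appear only between
-- digit pairs (an even number of hex digits precedes every whitespace character)
def Pre_computeKey (ciphertexts : List String) : Prop :=
  ciphertexts ≠ [] ∧ ciphertexts.all (fun s =>
    s.toList.all (fun c => hexCharB c || isWsB c) &&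
    (s.toList.countP (fun c => !isWsB c)) % 2 == 0 &&
    (List.range s.toList.length).all (fun i =>
      !isWsB (s.toList.getD i ' ') ||
        ((s.toList.take i).countP (fun c => !isWsB c)) % 2 == 0)) = true
instance (ciphertexts : List String) : Decidable (Pre_computeKey ciphertexts) := by
  unfold Pre_computeKey; infer_instance

def pvWitness_computeKey : List String := ["6120", "4142"]

def Spec_computeKey (ciphertexts : List String) (out : List (Option Int)) : Prop := out = computeKey_alt ciphertexts
instance (ciphertexts : List String) (out : List (Option Int)) : Decidable (Spec_computeKey ciphertexts out) := by unfold Spec_computeKey; infer_instance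

-- ===== CLAIM (what is proved, stated in full; the proofs are below) =====
def Claim_equal_computeKey : Prop := ∀ (ciphertexts : List String), Dom_computeKey ciphertexts → Pre_computeKey ciphertexts → Spec_computeKey ciphertexts (computeKey ciphertexts)

-- ===== LEMMAS AND PROOFS =====

-- abbreviations for the per-column quantities (proof-only)
def limitOf (cts : List String) (pos : Nat) : Int := numberOfMsgs cts pos - 1

def marginOf (cts : List String) (pos : Nat) : Int := PySem.Int.floordiv (limitOf cts pos) 4

def freqOf (cts : List String) (c1 : String) (pos : Nat) : Int :=
  ((cts.countP (fun c2 =>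
    decide (c1 ≠ c2) && decide (pos < (toBytes c2.toList).length) &&
      hasSpaceB (((toBytes c1.toList).getD pos 0) ^^^ ((toBytes c2.toList).getD pos 0))) : Nat) : Int)

def freqMin (cts : List String) (c1 : String) (pos : Nat) : Int :=
  ((cts.countP (fun c2 =>
    decide (c1 ≠ c2) &&
      decide (pos < (xorb (toBytes c1.toList) (toBytes c2.toList)).length) &&
      hasSpaceB ((xorb (toBytes c1.toList) (toBytes c2.toList)).getD pos 0)) : Nat) : Int)

def posStep (cts : List String) (pos : Nat) (st : Option Int × Int) (c : String) : Option Int × Int :=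
  if pos < (toBytes c.toList).length then
    let f := freqOf cts c pos
    if f ≥ limitOf cts pos - marginOf cts pos ∧ f > st.2 then
      (some (Int.ofNat (((toBytes c.toList).getD pos 0) ^^^ 32)), f)
    else st
  else st

def posStepA (cts : List String) (pos : Nat) (st : Option Int × Int) (c : String) : Option Int × Int :=
  if pos < c.toList.length / 2 then
    let f := freqMin cts c pos
    if f ≥ limitOf cts pos - marginOf cts pos ∧ f > st.2 then
      (some (Int.ofNat (((toBytes c.toList).getD pos 0) ^^^ 32)), f)
    else st
  else st

theorem toBytes_nil : toBytes [] = [] := rfl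

theorem toBytes_ws (c : Char) (rest : List Char) (hw : isWsB c = true) :
    toBytes (c :: rest) = toBytes rest := by
  rw [toBytes.eq_def]; simp [hw]

theorem toBytes_pair (c d : Char) (rest2 : List Char) (hw : isWsB c = false) :
    toBytes (c :: d :: rest2) = (hexVal c * 16 + hexVal d) :: toBytes rest2 := by
  rw [toBytes.eq_def]; simp [hw]

theorem toBytes_single (c : Char) (hw : isWsB c = false) : toBytes [c] = [] := by
  rw [toBytes.eq_def]; simp [hw]

theorem toBytes_le : ∀ l : List Char, 2 * (toBytes l).length ≤ l.length
  | [] => by simp [toBytes_nil]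
  | c :: rest => by
    by_cases hw : isWsB c
    · have := toBytes_le rest
      rw [toBytes_ws c rest hw]
      simp only [List.length_cons]
      omega
    · match rest with
      | [] => simp [toBytes_single c (by simpa using hw)]
      | d :: rest2 =>
        have := toBytes_le rest2
        rw [toBytes_pair c d rest2 (by simpa using hw)]
        simp only [List.length_cons]
        omega

theorem hexVal_lt (c : Char) : hexVal c < 16 := by
  unfold hexVal; split_ifs <;> omega

theorem toBytes_lt256 : ∀ l : List Char, ∀ x ∈ toBytes l, x < 256
  | [] => by simp [toBytes_nil]
  | c :: rest => by
    by_cases hw : isWsB c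
    · rw [toBytes_ws c rest hw]; exact toBytes_lt256 rest
    · match rest with
      | [] => simp [toBytes_single c (by simpa using hw)]
      | d :: rest2 =>
        rw [toBytes_pair c d rest2 (by simpa using hw)]
        intro x hx
        rcases List.mem_cons.mp hx with h | h
        · have h1 := hexVal_lt c
          have h2 := hexVal_lt d
          omega
        · exact toBytes_lt256 rest2 x h

theorem getD_set' {α : Type} (l : List α) (i j : Nat) (v d : α) :
    (l.set i v).getD j d = if i = j ∧ i < l.length then v else l.getD j d := by
  simp only [List.getD_eq_getElem?_getD, List.getElem?_set]
  split_ifs with h1 h2 <;> simp_all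
  omega

theorem findSpacesGo_length (xs : List Nat) (i : Nat) (fr : List Int) :
    (findSpacesGo xs i fr).length = fr.length := by
  induction xs generalizing i fr with
  | nil => simp [findSpacesGo]
  | cons x rest ih => simp only [findSpacesGo]; rw [ih]; split <;> simp only [List.length_set]

theorem findSpacesGo_getD (xs : List Nat) (i : Nat) (fr : List Int) (pos : Nat) :
    (findSpacesGo xs i fr).getD pos 0 =
      if i ≤ pos ∧ pos - i < xs.length ∧ pos < fr.length ∧ hasSpaceB (xs.getD (pos - i) 0)
      then fr.getD pos 0 + 1 else fr.getD pos 0 := by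
  induction xs generalizing i fr with
  | nil => simp [findSpacesGo]
  | cons x rest ih =>
    simp only [findSpacesGo]
    rw [ih]
    by_cases hx : hasSpaceB x
    · rw [if_pos hx]
      simp only [List.length_set, List.length_cons, getD_set']
      rcases Nat.lt_trichotomy pos i with hlt | heq | hgt
      · rw [if_neg (show ¬(i = pos ∧ i < fr.length) by intro h; omega)]
        split_ifs with h1 h2 h2 <;> try rfl
        · exact absurd h1.1 (by omega)
        · exact absurd h2.1 (by omega)
      · subst heq
        rw [if_neg (show ¬(pos + 1 ≤ pos ∧ pos - (pos + 1) < rest.length ∧ pos < fr.length ∧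
              hasSpaceB (rest.getD (pos - (pos + 1)) 0) = true) by intro h; omega)]
        rw [Nat.sub_self, List.getD_cons_zero]
        by_cases hi : pos < fr.length
        · rw [if_pos (⟨rfl, hi⟩ : pos = pos ∧ pos < fr.length),
              if_pos (show pos ≤ pos ∧ 0 < rest.length + 1 ∧ pos < fr.length ∧ hasSpaceB x = true
                from ⟨Nat.le_refl _, by omega, hi, hx⟩)]
        · rw [if_neg (show ¬(pos = pos ∧ pos < fr.length) by intro h; omega),
              if_neg (show ¬(pos ≤ pos ∧ 0 < rest.length + 1 ∧ pos < fr.length ∧ hasSpaceB x = true)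
                by intro h; omega)]
      · have hsub : pos - i = (pos - (i + 1)) + 1 := by omega
        rw [hsub, List.getD_cons_succ,
          if_neg (show ¬(i = pos ∧ i < fr.length) by intro h; omega)]
        split_ifs with h1 h2 h2 <;> try rfl
        · exact absurd ⟨by omega, by omega, h1.2.2.1, h1.2.2.2⟩ h2
        · exact absurd ⟨by omega, by omega, h2.2.2.1, h2.2.2.2⟩ h1
    · rw [if_neg hx]
      rcases Nat.lt_trichotomy pos i with hlt | heq | hgt
      · split_ifs with h1 h2 h2 <;> try rfl
        · exact absurd h1.1 (by omega)
        · exact absurd h2.1 (by omega)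
      · subst heq
        rw [if_neg (show ¬(pos + 1 ≤ pos ∧ pos - (pos + 1) < rest.length ∧ pos < fr.length ∧
              hasSpaceB (rest.getD (pos - (pos + 1)) 0) = true) by intro h; omega)]
        rw [Nat.sub_self, if_neg (show ¬(pos ≤ pos ∧ 0 < (x :: rest).length ∧
              pos < fr.length ∧ hasSpaceB ((x :: rest).getD 0 0) = true) by
            intro h; exact absurd (by simpa using h.2.2.2) hx)]
      · have hsub : pos - i = (pos - (i + 1)) + 1 := by omega
        rw [hsub, List.getD_cons_succ]
        simp only [List.length_cons]
        split_ifs with h1 h2 h2 <;> try rfl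
        · exact absurd ⟨by omega, by omega, h1.2.2.1, h1.2.2.2⟩ h2
        · exact absurd ⟨by omega, by omega, h2.2.2.1, h2.2.2.2⟩ h1

theorem xorb_length (m1 m2 : List Nat) : (xorb m1 m2).length = min m1.length m2.length := by
  simp [xorb]

theorem xorb_getD (m1 m2 : List Nat) (pos : Nat) (h1 : pos < m1.length) (h2 : pos < m2.length) :
    (xorb m1 m2).getD pos 0 = (m1.getD pos 0) ^^^ (m2.getD pos 0) := by
  simp [xorb, List.getD_eq_getElem?_getD, h1, h2]

theorem freqsFold_length (c1 : String) (l : List String) (fr : List Int) :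
    (l.foldl (fun fr c2 => if c1 ≠ c2 then findSpaces c1 c2 fr else fr) fr).length = fr.length := by
  induction l generalizing fr with
  | nil => rfl
  | cons c2 l ih =>
    simp only [List.foldl_cons]
    rw [ih]
    split
    · rw [findSpaces, findSpacesGo_length]
    · rfl

theorem freqsFold_getD (c1 : String) (l : List String) (fr : List Int) (pos : Nat)
    (hpos : pos < fr.length) :
    (l.foldl (fun fr c2 => if c1 ≠ c2 then findSpaces c1 c2 fr else fr) fr).getD pos 0 =
      fr.getD pos 0 + freqMin l c1 pos := by
  induction l generalizing fr with
  | nil => simp [freqMin]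
  | cons c2 l ih =>
    simp only [List.foldl_cons]
    rw [ih]
    · simp only [freqMin, List.countP_cons]
      by_cases hc : c1 ≠ c2
      · simp only [if_pos hc, findSpaces, findSpacesGo_getD, Nat.sub_zero]
        by_cases hxl : pos < (xorb (toBytes c1.toList) (toBytes c2.toList)).length
        · by_cases hsp : hasSpaceB ((xorb (toBytes c1.toList) (toBytes c2.toList)).getD pos 0)
          · rw [if_pos ⟨Nat.zero_le _, hxl, hpos, hsp⟩,
              if_pos (show (decide (c1 ≠ c2) &&
                decide (pos < (xorb (toBytes c1.toList) (toBytes c2.toList)).length) &&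
                hasSpaceB ((xorb (toBytes c1.toList) (toBytes c2.toList)).getD pos 0)) = true
                by rw [hsp]; simp [hc, hxl])]
            omega
          · rw [if_neg (by intro h; exact absurd h.2.2.2 hsp),
              if_neg (show ¬((decide (c1 ≠ c2) &&
                decide (pos < (xorb (toBytes c1.toList) (toBytes c2.toList)).length) &&
                hasSpaceB ((xorb (toBytes c1.toList) (toBytes c2.toList)).getD pos 0)) = true)
                by simp only [Bool.and_eq_true]; intro h; exact absurd h.2 hsp)]
            omega
        · rw [if_neg (by intro h; exact absurd h.2.1 hxl),
            if_neg (show ¬((decide (c1 ≠ c2) &&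
              decide (pos < (xorb (toBytes c1.toList) (toBytes c2.toList)).length) &&
              hasSpaceB ((xorb (toBytes c1.toList) (toBytes c2.toList)).getD pos 0)) = true)
              by simp [hxl])]
          omega
      · rw [if_neg hc,
          if_neg (show ¬((decide (c1 ≠ c2) &&
            decide (pos < (xorb (toBytes c1.toList) (toBytes c2.toList)).length) &&
            hasSpaceB ((xorb (toBytes c1.toList) (toBytes c2.toList)).getD pos 0)) = true)
            by simp [hc])]
        omega
    · by_cases hc : c1 ≠ c2
      · rw [if_pos hc, findSpaces, findSpacesGo_length]; exact hpos
      · rw [if_neg hc]; exact hpos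

theorem freqMin_eq (cts : List String) (c1 : String) (pos : Nat)
    (hb : pos < (toBytes c1.toList).length) : freqMin cts c1 pos = freqOf cts c1 pos := by
  unfold freqMin freqOf
  congr 1
  apply List.countP_congr
  intro c2 _
  by_cases h2 : pos < (toBytes c2.toList).length
  · rw [xorb_getD _ _ _ hb h2]
    simp [xorb_length, hb, h2]
  · simp [xorb_length, h2, hb]

theorem freqMin_zero (cts : List String) (c1 : String) (pos : Nat)
    (hb : (toBytes c1.toList).length ≤ pos) : freqMin cts c1 pos = 0 := by
  unfold freqMin
  rw [List.countP_eq_zero.mpr]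
  · rfl
  · intro c2 _
    simp only [xorb_length, Bool.and_eq_true, decide_eq_true_eq, not_and]
    intro _ h
    omega

theorem keyLoopGo_length (cts : List String) (b1 : List Nat) (freqs : List Int) (pos0 : Nat)
    (key : List (Option Int)) (maxF : List Int) :
    (keyLoopGo cts b1 freqs pos0 key maxF).1.length = key.length ∧
    (keyLoopGo cts b1 freqs pos0 key maxF).2.length = maxF.length := by
  induction freqs generalizing pos0 key maxF with
  | nil => exact ⟨rfl, rfl⟩
  | cons f rest ih =>
    simp only [keyLoopGo]
    split
    · rw [(ih _ _ _).1, (ih _ _ _).2]; simp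
    · exact ih _ _ _

theorem keyLoopGo_getD (cts : List String) (b1 : List Nat) (freqs : List Int) (pos0 : Nat)
    (key : List (Option Int)) (maxF : List Int) (pos : Nat) (hlen : key.length = maxF.length) :
    ((keyLoopGo cts b1 freqs pos0 key maxF).1.getD pos none,
     (keyLoopGo cts b1 freqs pos0 key maxF).2.getD pos 0) =
      if pos0 ≤ pos ∧ pos - pos0 < freqs.length ∧ pos < key.length ∧
         (freqs.getD (pos - pos0) 0 ≥ limitOf cts pos - marginOf cts pos ∧
          freqs.getD (pos - pos0) 0 > maxF.getD pos 0)
      then (some (Int.ofNat ((b1.getD pos 0) ^^^ 32)), freqs.getD (pos - pos0) 0)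
      else (key.getD pos none, maxF.getD pos 0) := by
  induction freqs generalizing pos0 key maxF with
  | nil => simp [keyLoopGo]
  | cons f rest ih =>
    simp only [keyLoopGo]
    rw [show numberOfMsgs cts pos0 - 1 = limitOf cts pos0 from rfl]
    rw [show PySem.Int.floordiv (limitOf cts pos0) 4 = marginOf cts pos0 from rfl]
    rcases Nat.lt_trichotomy pos pos0 with hlt | heq | hgt
    · by_cases hcond : f ≥ limitOf cts pos0 - marginOf cts pos0 ∧ f > maxF.getD pos0 0
      · rw [if_pos hcond,
          ih (pos0 + 1) (key.set pos0 (some (Int.ofNat (b1.getD pos0 0 ^^^ 32)))) (maxF.set pos0 f) (by simp [hlen])]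
        simp only [List.length_set, getD_set']
        split_ifs <;> first | rfl | omega
      · rw [if_neg hcond, ih _ _ _ hlen]
        split_ifs <;> first | rfl | omega
    · subst heq
      rw [Nat.sub_self, List.getD_cons_zero]
      by_cases hcond : f ≥ limitOf cts pos - marginOf cts pos ∧ f > maxF.getD pos 0
      · rw [if_pos hcond,
          ih (pos + 1) (key.set pos (some (Int.ofNat (b1.getD pos 0 ^^^ 32)))) (maxF.set pos f) (by simp [hlen])]
        simp only [List.length_set, getD_set']
        split_ifs <;> first | rfl | omega |
          exact absurd (show pos ≤ pos ∧ 0 < (f :: rest).length ∧ pos < key.length ∧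
              f ≥ limitOf cts pos - marginOf cts pos ∧ f > maxF.getD pos 0 from
            ⟨le_refl _, by simp, by omega, hcond.1, hcond.2⟩) (by assumption) |
          (exfalso; exact (by assumption : ¬(True ∧ pos < key.length)) ⟨trivial, by omega⟩) |
          (exfalso; exact (by assumption : ¬(True ∧ pos < maxF.length)) ⟨trivial, by omega⟩)
      · rw [if_neg hcond, ih _ _ _ hlen]
        split_ifs <;> first | rfl | omega
    · have hsub : pos - pos0 = (pos - (pos0 + 1)) + 1 := by omega
      rw [hsub, List.getD_cons_succ]
      simp only [List.length_cons]
      by_cases hcond : f ≥ limitOf cts pos0 - marginOf cts pos0 ∧ f > maxF.getD pos0 0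
      · rw [if_pos hcond,
          ih (pos0 + 1) (key.set pos0 (some (Int.ofNat (b1.getD pos0 0 ^^^ 32)))) (maxF.set pos0 f) (by simp [hlen])]
        simp only [List.length_set, getD_set']
        split_ifs <;> first | rfl | omega
      · rw [if_neg hcond, ih _ _ _ hlen]
        split_ifs <;> first | rfl | omega

theorem outerStep_length (cts : List String) (c1 : String)
    (st : List (Option Int) × List Int) :
    (keyLoopGo cts (toBytes c1.toList)
      (cts.foldl (fun fr c2 => if c1 ≠ c2 then findSpaces c1 c2 fr else fr)
        (List.replicate (c1.toList.length / 2) (0 : Int))) 0 st.1 st.2).1.length = st.1.length ∧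
    (keyLoopGo cts (toBytes c1.toList)
      (cts.foldl (fun fr c2 => if c1 ≠ c2 then findSpaces c1 c2 fr else fr)
        (List.replicate (c1.toList.length / 2) (0 : Int))) 0 st.1 st.2).2.length = st.2.length :=
  keyLoopGo_length _ _ _ _ _ _

theorem outerFold_length (cts : List String) :
    ∀ (l : List String) (st : List (Option Int) × List Int),
    ((l.foldl (fun (st : List (Option Int) × List Int) c1 =>
        keyLoopGo cts (toBytes c1.toList)
          (cts.foldl (fun fr c2 => if c1 ≠ c2 then findSpaces c1 c2 fr else fr)
            (List.replicate (c1.toList.length / 2) (0 : Int))) 0 st.1 st.2) st).1.length = st.1.length ∧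
     (l.foldl (fun (st : List (Option Int) × List Int) c1 =>
        keyLoopGo cts (toBytes c1.toList)
          (cts.foldl (fun fr c2 => if c1 ≠ c2 then findSpaces c1 c2 fr else fr)
            (List.replicate (c1.toList.length / 2) (0 : Int))) 0 st.1 st.2) st).2.length = st.2.length)
  | [], st => ⟨rfl, rfl⟩
  | c1 :: l, st => by
    simp only [List.foldl_cons]
    rw [(outerFold_length cts l _).1, (outerFold_length cts l _).2]
    exact outerStep_length cts c1 st

theorem zip_map_self {α β : Type} (g : α → β) :
    ∀ l : List α, l.zip (l.map g) = l.map (fun a => (a, g a))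
  | [] => rfl
  | a :: l => by simp [zip_map_self g l]

theorem getD_replicate' {α : Type} (n i : Nat) (a d : α) :
    (List.replicate n a).getD i d = if i < n then a else d := by
  simp only [List.getD_eq_getElem?_getD, List.getElem?_replicate]
  split_ifs <;> simp

theorem outerStep_getD (cts : List String) (c1 : String) (pos : Nat)
    (key : List (Option Int)) (maxF : List Int)
    (hlen : key.length = maxF.length) (hpos : pos < key.length) :
    ((keyLoopGo cts (toBytes c1.toList)
        (cts.foldl (fun fr c2 => if c1 ≠ c2 then findSpaces c1 c2 fr else fr)
          (List.replicate (c1.toList.length / 2) (0 : Int))) 0 key maxF).1.getD pos none,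
     (keyLoopGo cts (toBytes c1.toList)
        (cts.foldl (fun fr c2 => if c1 ≠ c2 then findSpaces c1 c2 fr else fr)
          (List.replicate (c1.toList.length / 2) (0 : Int))) 0 key maxF).2.getD pos 0) =
      posStepA cts pos (key.getD pos none, maxF.getD pos 0) c1 := by
  have hfl : (cts.foldl (fun fr c2 => if c1 ≠ c2 then findSpaces c1 c2 fr else fr)
      (List.replicate (c1.toList.length / 2) (0 : Int))).length = c1.toList.length / 2 := by
    rw [freqsFold_length, List.length_replicate]
  rw [keyLoopGo_getD cts (toBytes c1.toList) _ 0 key maxF pos hlen]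
  simp only [posStepA, Nat.sub_zero]
  by_cases hhalf : pos < c1.toList.length / 2
  · have hfr : (cts.foldl (fun fr c2 => if c1 ≠ c2 then findSpaces c1 c2 fr else fr)
        (List.replicate (c1.toList.length / 2) (0 : Int))).getD pos 0 = freqMin cts c1 pos := by
      rw [freqsFold_getD c1 cts _ pos (by rw [List.length_replicate]; exact hhalf)]
      simp
    rw [hfr, if_pos hhalf]
    by_cases hcond : freqMin cts c1 pos ≥ limitOf cts pos - marginOf cts pos ∧
        freqMin cts c1 pos > maxF.getD pos 0
    · rw [if_pos ⟨Nat.zero_le _, by omega, hpos, hcond.1, hcond.2⟩, if_pos hcond]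
    · rw [if_neg (by intro h; exact hcond ⟨h.2.2.2.1, h.2.2.2.2⟩), if_neg hcond]
  · rw [if_neg hhalf, if_neg (by intro h; have := h.2.1; omega)]

theorem outerProj (cts : List String) (pos : Nat) :
    ∀ (l : List String) (key : List (Option Int)) (maxF : List Int),
    key.length = maxF.length → pos < key.length →
    (((l.foldl (fun (st : List (Option Int) × List Int) c1 =>
        keyLoopGo cts (toBytes c1.toList)
          (cts.foldl (fun fr c2 => if c1 ≠ c2 then findSpaces c1 c2 fr else fr)
            (List.replicate (c1.toList.length / 2) (0 : Int))) 0 st.1 st.2) (key, maxF)).1.getD pos none,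
      (l.foldl (fun (st : List (Option Int) × List Int) c1 =>
        keyLoopGo cts (toBytes c1.toList)
          (cts.foldl (fun fr c2 => if c1 ≠ c2 then findSpaces c1 c2 fr else fr)
            (List.replicate (c1.toList.length / 2) (0 : Int))) 0 st.1 st.2) (key, maxF)).2.getD pos 0) =
      l.foldl (posStepA cts pos) (key.getD pos none, maxF.getD pos 0))
  | [], key, maxF, _, _ => rfl
  | c1 :: l, key, maxF, hlen, hpos => by
    simp only [List.foldl_cons]
    have hst : (keyLoopGo cts (toBytes c1.toList)
        (cts.foldl (fun fr c2 => if c1 ≠ c2 then findSpaces c1 c2 fr else fr)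
          (List.replicate (c1.toList.length / 2) (0 : Int))) 0 key maxF) =
        ((keyLoopGo cts (toBytes c1.toList)
          (cts.foldl (fun fr c2 => if c1 ≠ c2 then findSpaces c1 c2 fr else fr)
            (List.replicate (c1.toList.length / 2) (0 : Int))) 0 key maxF).1,
         (keyLoopGo cts (toBytes c1.toList)
          (cts.foldl (fun fr c2 => if c1 ≠ c2 then findSpaces c1 c2 fr else fr)
            (List.replicate (c1.toList.length / 2) (0 : Int))) 0 key maxF).2) := rfl
    rw [hst, outerProj cts pos l _ _
        (by rw [(keyLoopGo_length _ _ _ _ _ _).1, (keyLoopGo_length _ _ _ _ _ _).2]; exact hlen)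
        (by rw [(keyLoopGo_length _ _ _ _ _ _).1]; exact hpos),
      outerStep_getD cts c1 pos key maxF hlen hpos]

theorem stepA_eq_stepB (cts : List String) (pos : Nat) (st : Option Int × Int)
    (hst : 0 ≤ st.2) (c : String) :
    posStepA cts pos st c = posStep cts pos st c := by
  unfold posStepA posStep
  by_cases hb : pos < (toBytes c.toList).length
  · have hhalf : pos < c.toList.length / 2 := by have := toBytes_le c.toList; omega
    rw [if_pos hhalf, if_pos hb, freqMin_eq cts c pos hb]
  · rw [if_neg hb]
    by_cases hhalf : pos < c.toList.length / 2
    · rw [if_pos hhalf, freqMin_zero cts c pos (by omega),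
        if_neg (by intro h; have := h.2; omega)]
    · rw [if_neg hhalf]

theorem stepA_nonneg (cts : List String) (pos : Nat) (st : Option Int × Int)
    (hst : 0 ≤ st.2) (c : String) : 0 ≤ (posStepA cts pos st c).2 := by
  unfold posStepA
  by_cases h1 : pos < c.toList.length / 2
  · rw [if_pos h1]
    by_cases h2 : freqMin cts c pos ≥ limitOf cts pos - marginOf cts pos ∧
        freqMin cts c pos > st.2
    · rw [if_pos h2]
      have := h2.2
      simp only
      omega
    · rw [if_neg h2]; exact hst
  · rw [if_neg h1]; exact hst

theorem foldA_eq_foldB (cts : List String) (pos : Nat) :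
    ∀ (l : List String) (st : Option Int × Int), 0 ≤ st.2 →
      l.foldl (posStepA cts pos) st = l.foldl (posStep cts pos) st
  | [], _, _ => rfl
  | c :: l, st, hst => by
    simp only [List.foldl_cons]
    rw [foldA_eq_foldB cts pos l _ (stepA_nonneg cts pos st hst c),
      stepA_eq_stepB cts pos st hst c]

-- ===== new B-side lemmas (histogram and multiplicity) =====

-- the selective column sum B computes over the histogram (proof-only shorthand)
def selSum (x : Nat) (c : List Int) : Int :=
  ((List.range 256).map (fun v => if hasSpaceB (x ^^^ v) then c.getD v 0 else 0)).sum

theorem foldl_if_add (g : Nat → Bool) (h : Nat → Int) (l : List Nat) (a : Int) :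
    l.foldl (fun acc v => if g v then acc + h v else acc) a =
      a + (l.map (fun v => if g v then h v else 0)).sum := by
  have : (fun (acc : Int) v => if g v then acc + h v else acc) =
      (fun acc v => acc + (if g v then h v else 0)) := by
    funext acc v; split <;> simp
  rw [this, PySem.List.foldl_add]

theorem sum_range_indicator : ∀ (n : Nat) (k : Nat) (e : Int),
    ((List.range n).map (fun v => if v = k then e else 0)).sum = if k < n then e else 0
  | 0, k, e => by simp
  | n + 1, k, e => by
    rw [List.range_succ, List.map_append, List.sum_append, sum_range_indicator n k e]
    by_cases h : k < n
    · simp [h, Nat.lt_succ_of_lt h, Nat.ne_of_gt h]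
    · by_cases h2 : n = k
      · subst h2; simp
      · have : ¬ k < n + 1 := by omega
        simp [h, h2, this]

theorem selSum_set (x k : Nat) (c : List Int) (hlen : c.length = 256) (hk : k < 256) :
    selSum x (c.set k (c.getD k 0 + 1)) =
      selSum x c + (if hasSpaceB (x ^^^ k) then 1 else 0) := by
  unfold selSum
  have hmap : (List.range 256).map
      (fun v => if hasSpaceB (x ^^^ v) then (c.set k (c.getD k 0 + 1)).getD v 0 else 0) =
      (List.range 256).map (fun v =>
        (if hasSpaceB (x ^^^ v) then c.getD v 0 else 0) +
        (if v = k then (if hasSpaceB (x ^^^ k) then 1 else 0) else 0)) := by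
    apply List.map_congr_left
    intro v _
    rw [getD_set']
    by_cases hs : hasSpaceB (x ^^^ v)
    · simp only [if_pos hs]
      by_cases hvk : v = k
      · rw [if_pos (show k = v ∧ k < c.length from ⟨hvk.symm, by omega⟩), hvk]
        simp [← hvk, hs]
      · rw [if_neg (show ¬(k = v ∧ k < c.length) by intro h; exact hvk h.1.symm)]
        simp [hvk]
    · by_cases hvk : v = k
      · rw [← hvk]
        simp [hs]
      · simp [hs, hvk]
  rw [hmap, PySem.List.sum_map_add_int, sum_range_indicator 256 k _, if_pos hk]

theorem hist_selSum (pos : Nat) (x : Nat) :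
    ∀ (byts : List (List Nat)) (acc : List Int), acc.length = 256 →
    (∀ b ∈ byts, ∀ y ∈ b, y < 256) →
    selSum x (byts.foldl
      (fun c b => if pos < b.length then c.set (b.getD pos 0) (c.getD (b.getD pos 0) 0 + 1) else c)
      acc) =
      selSum x acc +
      ((byts.countP (fun b => decide (pos < b.length) && hasSpaceB (x ^^^ b.getD pos 0)) : Nat) : Int)
  | [], acc, _, _ => by simp
  | b :: byts, acc, hlen, hmem => by
    simp only [List.foldl_cons, List.countP_cons]
    by_cases hp : pos < b.length
    · have hk : b.getD pos 0 < 256 := by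
        have : b.getD pos 0 = b[pos] := List.getD_eq_getElem b 0 hp
        rw [this]
        exact hmem b (by simp) _ (List.getElem_mem hp)
      rw [if_pos hp,
        hist_selSum pos x byts _ (by rw [List.length_set]; exact hlen)
          (fun b' hb' => hmem b' (List.mem_cons_of_mem _ hb')),
        selSum_set x _ acc hlen hk]
      by_cases hs : hasSpaceB (x ^^^ b.getD pos 0)
      · simp only [hs, if_pos, decide_eq_true hp, Bool.true_and, if_pos]
        push_cast
        ring
      · simp only [hs, Bool.and_false, if_neg (Bool.false_ne_true)]
        simp
    · rw [if_neg hp,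
        hist_selSum pos x byts acc hlen (fun b' hb' => hmem b' (List.mem_cons_of_mem _ hb'))]
      simp [hp]

theorem selSum_replicate_zero (x : Nat) : selSum x (List.replicate 256 (0 : Int)) = 0 := by
  unfold selSum
  have : (List.range 256).map
      (fun v => if hasSpaceB (x ^^^ v) then (List.replicate 256 (0 : Int)).getD v 0 else 0) =
      (List.range 256).map (fun _ => (0 : Int)) := by
    apply List.map_congr_left
    intro v _
    rw [getD_replicate']
    split_ifs <;> rfl
  rw [this]
  exact List.sum_eq_zero (by intro x hx; rcases List.mem_map.mp hx with ⟨v, _, rfl⟩; rfl)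

-- countP split along an auxiliary boolean test (specific combination used below)
theorem countP_split {α : Type} (p q : α → Bool) : ∀ l : List α,
    l.countP p = l.countP (fun a => p a && q a) + l.countP (fun a => p a && !q a)
  | [] => rfl
  | a :: l => by
    simp only [List.countP_cons, countP_split p q l]
    by_cases hp : p a <;> by_cases hq : q a <;> simp [hp, hq] <;> omega

theorem freq_split (cs : List String) (c : String) (pos : Nat)
    (hb : pos < (toBytes c.toList).length) :
    (((cs.map (fun s => toBytes s.toList)).countP
        (fun b => decide (pos < b.length) &&
          hasSpaceB (((toBytes c.toList).getD pos 0) ^^^ b.getD pos 0)) : Nat) : Int) -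
      ((cs.count c : Nat) : Int) = freqOf cs c pos := by
  rw [List.countP_map]
  simp only [Function.comp_def]
  rw [countP_split (fun s => (decide (pos < (toBytes s.toList).length) &&
        hasSpaceB (((toBytes c.toList).getD pos 0) ^^^ (toBytes s.toList).getD pos 0)))
      (fun s => s == c) cs]
  have h1 : cs.countP (fun s => (decide (pos < (toBytes s.toList).length) &&
        hasSpaceB (((toBytes c.toList).getD pos 0) ^^^ (toBytes s.toList).getD pos 0)) && (s == c)) =
      cs.count c := by
    rw [List.count_eq_countP]
    apply List.countP_congr
    intro s _
    constructor
    · intro h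
      exact (Bool.and_eq_true _ _).mp h |>.2
    · intro h
      have hsc : s = c := by simpa using h
      subst hsc
      simp [hb, Nat.xor_self, show hasSpaceB 0 = true from rfl]
  have h2 : cs.countP (fun s => (decide (pos < (toBytes s.toList).length) &&
        hasSpaceB (((toBytes c.toList).getD pos 0) ^^^ (toBytes s.toList).getD pos 0)) && !(s == c)) =
      cs.countP (fun c2 => decide (c ≠ c2) && decide (pos < (toBytes c2.toList).length) &&
        hasSpaceB (((toBytes c.toList).getD pos 0) ^^^ ((toBytes c2.toList).getD pos 0))) := by
    apply List.countP_congr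
    intro s _
    by_cases hne : c = s
    · subst hne; simp
    · have : (s == c) = false := by
        simp only [beq_eq_false_iff_ne, ne_eq]
        intro h; exact hne h.symm
      simp [hne, this]
  rw [h1, h2]
  unfold freqOf
  push_cast
  ring

-- the multiplicity dict B builds is Counter(ciphertexts)
theorem mult_getD (cs : List String) (c : String) :
    (cs.foldl (fun (d : PySem.Dict String Int) s => d.insert s (d.getD s 0 + 1))
      PySem.Dict.empty).getD c 0 = ((cs.count c : Nat) : Int) := by
  rw [PySem.Dict.foldl_insert_getD_add_one_eq_counter, PySem.Dict.getD_counter]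

-- B's column fold is A's posStep fold
theorem colB_eq (cs : List String) (pos : Nat) :
    ((cs.map (fun a => (a, toBytes a.toList))).foldl (fun (st : Option Int × Int) p =>
        if pos < p.2.length then
          let x := p.2.getD pos 0
          let freq := ((List.range 256).foldl
              (fun a v => if hasSpaceB (x ^^^ v) then a +
                ((cs.map (fun s => toBytes s.toList)).foldl
                  (fun c b => if pos < b.length then
                    c.set (b.getD pos 0) (c.getD (b.getD pos 0) 0 + 1) else c)
                  (List.replicate 256 (0 : Int))).getD v 0 else a) 0)
            - (cs.foldl (fun (d : PySem.Dict String Int) s => d.insert s (d.getD s 0 + 1))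
                PySem.Dict.empty).getD p.1 0
          if freq ≥ limitOf cs pos - marginOf cs pos ∧ freq > st.2
          then (some (Int.ofNat (x ^^^ 32)), freq) else st
        else st)
      ((none : Option Int), (0 : Int))) =
    cs.foldl (posStep cs pos) ((none : Option Int), (0 : Int)) := by
  rw [List.foldl_map]
  apply PySem.List.foldl_congr_mem
  intro st c _
  simp only [posStep]
  by_cases hb : pos < (toBytes c.toList).length
  · rw [if_pos hb, if_pos hb]
    have hfreq : ((List.range 256).foldl
        (fun a v => if hasSpaceB (((toBytes c.toList).getD pos 0) ^^^ v) then a +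
          ((cs.map (fun s => toBytes s.toList)).foldl
            (fun c b => if pos < b.length then
              c.set (b.getD pos 0) (c.getD (b.getD pos 0) 0 + 1) else c)
            (List.replicate 256 (0 : Int))).getD v 0 else a) 0)
        - (cs.foldl (fun (d : PySem.Dict String Int) s => d.insert s (d.getD s 0 + 1))
            PySem.Dict.empty).getD c 0 = freqOf cs c pos := by
      rw [foldl_if_add]
      rw [show (0 : Int) + ((List.range 256).map (fun v =>
          if hasSpaceB (((toBytes c.toList).getD pos 0) ^^^ v) then
            ((cs.map (fun s => toBytes s.toList)).foldl
              (fun c b => if pos < b.length then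
                c.set (b.getD pos 0) (c.getD (b.getD pos 0) 0 + 1) else c)
              (List.replicate 256 (0 : Int))).getD v 0 else 0)).sum =
          selSum ((toBytes c.toList).getD pos 0)
            ((cs.map (fun s => toBytes s.toList)).foldl
              (fun c b => if pos < b.length then
                c.set (b.getD pos 0) (c.getD (b.getD pos 0) 0 + 1) else c)
              (List.replicate 256 (0 : Int))) from by rw [selSum]; ring]
      rw [hist_selSum pos _ _ _ (by rw [List.length_replicate])
          (by intro b hb' y hy
              rcases List.mem_map.mp hb' with ⟨s, _, rfl⟩
              exact toBytes_lt256 s.toList y hy),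
        selSum_replicate_zero, mult_getD]
      rw [show (0 : Int) + (((cs.map (fun s => toBytes s.toList)).countP
          (fun b => decide (pos < b.length) &&
            hasSpaceB (((toBytes c.toList).getD pos 0) ^^^ b.getD pos 0)) : Nat) : Int) =
        (((cs.map (fun s => toBytes s.toList)).countP
          (fun b => decide (pos < b.length) &&
            hasSpaceB (((toBytes c.toList).getD pos 0) ^^^ b.getD pos 0)) : Nat) : Int) from by ring]
      exact freq_split cs c pos hb
    rw [hfreq]
  · rw [if_neg hb, if_neg hb]

theorem computeKey_eq_alt (cs : List String) : computeKey cs = computeKey_alt cs := by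
  simp only [computeKey, computeKey_alt]
  rw [zip_map_self]
  apply List.ext_getElem
  · rw [List.length_map, List.length_range, (outerFold_length cs cs _).1, List.length_replicate]
  · intro pos h1 h2
    rw [List.getElem_map, List.getElem_range]
    rw [← List.getD_eq_getElem _ none h1]
    rw [(outerFold_length cs cs _).1, List.length_replicate] at h1
    have proj := congrArg Prod.fst (outerProj cs pos cs
      (List.replicate (List.foldl (fun m s => max m (s.toList.length / 2)) 0 cs) none)
      (List.replicate (List.foldl (fun m s => max m (s.toList.length / 2)) 0 cs) 0)
      (by simp) (by rw [List.length_replicate]; exact h1))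
    simp only [getD_replicate', if_pos h1] at proj
    rw [proj, foldA_eq_foldB cs pos cs (none, 0) (by norm_num)]
    rw [← colB_eq cs pos]
    rfl

-- ===== VERDICT (by name: the statement is the Claim_ definition above) =====
theorem computeKey_spec : Claim_equal_computeKey := by
  intro cs _ _
  unfold Spec_computeKey
  exact computeKey_eq_alt cs
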